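-- pv_equiv track=rewrite | github.com/themathemagician2025/super_ai | core_ai/config.py | apply_config_overrides
-- ===== SOURCE A (Python) =====
-- from typing import Dict, Any, Optional, List
--
-- def export_config_to_dict(config_str: str) -> Dict[str, Dict[str, str]]:
--     """Helper function to export config string to dictionary."""
--     return {"config": {"data": config_str}}
--
-- def apply_config_overrides(base_config: str, override_config: str) -> str:
--     """Apply overrides to a base configuration."""
--     base_dict = export_config_to_dict(base_config)
--     override_dict = export_config_to_dict(override_config)
--     for section, params in override_dict.items():
--         base_dict.setdefault(section, {}).update(params)
--     result = "; Overridden Configuration\n"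
--     for section, params in base_dict.items():
--         result += f"[{section}]\n"
--         for key, value in params.items():
--             result += f"{key} = {value}\n"
--     return result
-- ===== SOURCE B (Python) =====
-- def apply_config_overrides(base_config: str, override_config: str) -> str:
--     """Apply overrides to a base configuration."""
--     # The single 'config'/'data' entry is always overwritten by the override,
--     # so the output is a fixed-shape string depending only on override_config.
--     return f"; Overridden Configuration\n[config]\ndata = {override_config}\n"
-- ===== Notes on version B (the rewrite author's own statement) =====
-- stated objective: simpler
-- what changed: B drops the helper, the nested dicts and both output loops: since the override always overwrites the single 'config'/'data' entry, B returns the closed-form formatted string directly from override_config.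
import Mathlib
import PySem

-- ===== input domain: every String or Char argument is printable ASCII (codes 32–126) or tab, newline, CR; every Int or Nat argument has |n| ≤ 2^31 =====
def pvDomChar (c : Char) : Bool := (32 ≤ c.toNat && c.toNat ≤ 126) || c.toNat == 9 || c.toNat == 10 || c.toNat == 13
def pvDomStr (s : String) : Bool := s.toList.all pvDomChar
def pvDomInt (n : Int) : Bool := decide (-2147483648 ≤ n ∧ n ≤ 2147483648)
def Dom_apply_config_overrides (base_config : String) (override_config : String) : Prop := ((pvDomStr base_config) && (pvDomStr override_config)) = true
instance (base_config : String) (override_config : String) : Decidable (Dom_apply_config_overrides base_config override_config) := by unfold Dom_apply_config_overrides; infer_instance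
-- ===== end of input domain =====

-- B replaces A's dict construction and output loops by the closed-form formatted string (simpler).


-- ===== PORT A =====
def export_config_to_dict (config_str : String) : PySem.Dict String (PySem.Dict String String) :=
  PySem.Dict.empty.insert "config" (PySem.Dict.empty.insert "data" config_str)

def apply_config_overrides (base_config : String) (override_config : String) : String :=
  let base_dict := export_config_to_dict base_config
  let override_dict := export_config_to_dict override_config
  -- for section, params in override_dict.items(): base_dict.setdefault(section, {}).update(params)
  let base_dict := override_dict.items.foldl
    (fun d p =>
      let d := d.setdefault p.1 PySem.Dict.empty
      d.insert p.1 ((d.getD p.1 PySem.Dict.empty).update p.2.items)) base_dict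
  let result := "; Overridden Configuration\n"
  let result := base_dict.items.foldl
    (fun r p =>
      p.2.items.foldl (fun r kv => r ++ kv.1 ++ " = " ++ kv.2 ++ "\n")
        (r ++ "[" ++ p.1 ++ "]\n")) result
  result

-- ===== PORT B =====
def apply_config_overrides_alt (base_config : String) (override_config : String) : String :=
  "; Overridden Configuration\n[config]\ndata = " ++ override_config ++ "\n"

-- ===== PRECONDITION & SPEC =====
def Spec_apply_config_overrides (base_config : String) (override_config : String) (out : String) : Prop := out = apply_config_overrides_alt base_config override_config
instance (base_config : String) (override_config : String) (out : String) : Decidable (Spec_apply_config_overrides base_config override_config out) := by unfold Spec_apply_config_overrides; infer_instance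

-- ===== CLAIM (what is proved, stated in full; the proofs are below) =====
def Claim_equal_apply_config_overrides : Prop := ∀ (base_config : String) (override_config : String), Dom_apply_config_overrides base_config override_config → Spec_apply_config_overrides base_config override_config (apply_config_overrides base_config override_config)

-- ===== LEMMAS AND PROOFS =====

theorem apply_config_overrides_eq (b o : String) :
    apply_config_overrides b o = apply_config_overrides_alt b o := by
  simp [apply_config_overrides, apply_config_overrides_alt, export_config_to_dict,
    PySem.Dict.insert, PySem.Dict.empty, PySem.Dict.setdefault, PySem.Dict.getD,
    PySem.Dict.get?, PySem.Dict.update, PySem.Dict.contains, List.foldl]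

-- ===== VERDICT (by name: the statement is the Claim_ definition above) =====
theorem apply_config_overrides_spec : Claim_equal_apply_config_overrides := by
  intro b o _
  exact apply_config_overrides_eq b o
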